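-- pv_equiv track=rewrite | github.com/childersjac-max/Line-Tracker-Model | features/arbitrage.py | _opposing_side
-- ===== SOURCE A (Python) =====
-- def _opposing_side(market_dict) -> dict:
--     """Given snap[market], return {side: other_side_label}."""
--     sides = list(market_dict.keys())
--     if len(sides) < 2:
--         return {}
--     out = {}
--     # We support 2-way markets (the only kind in MARKETS = h2h/spreads/totals).
--     # Pair every side with every OTHER side; in practice only one pair exists.
--     for s in sides:
--         for o in sides:
--             if o != s:
--                 out[s] = o
--                 break
--     return out
-- ===== SOURCE B (Python) =====
-- def _opposing_side(market_dict) -> dict: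
--     """Given snap[market], return {side: other_side_label}."""
--     sides = list(market_dict.keys())
--     if len(sides) < 2:
--         return {}
--     first, second = sides[0], sides[1]
--     # The first OTHER side is `first` for every side except `first` itself,
--     # whose first other side is `second`: a closed-form O(1) choice per side.
--     return {s: (second if s == first else first) for s in sides}
-- ===== Notes on version B (the rewrite author's own statement) =====
-- stated objective: simpler
-- what changed: Replaces the nested find-first-other-side scan (inner loop with break) by a single pass that picks the opposing side in closed form: sides[1] for the first side, sides[0] for every other side.
import Mathlib
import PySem

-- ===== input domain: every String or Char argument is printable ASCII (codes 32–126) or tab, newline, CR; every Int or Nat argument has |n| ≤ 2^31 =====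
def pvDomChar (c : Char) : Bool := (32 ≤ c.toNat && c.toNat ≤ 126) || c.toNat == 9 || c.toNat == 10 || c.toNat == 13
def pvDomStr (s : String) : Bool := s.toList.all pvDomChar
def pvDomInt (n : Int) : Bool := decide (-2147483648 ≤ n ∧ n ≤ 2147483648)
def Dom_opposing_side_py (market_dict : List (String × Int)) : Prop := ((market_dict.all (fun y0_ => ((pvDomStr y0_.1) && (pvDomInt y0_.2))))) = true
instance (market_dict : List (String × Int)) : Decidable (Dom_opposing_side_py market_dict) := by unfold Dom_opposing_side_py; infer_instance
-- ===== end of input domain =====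

-- B replaces the nested find-first-other-side scan with a single pass choosing
-- the opposing side in closed form (sides[1] for the first side, sides[0] otherwise): simpler.


-- ===== PORT A =====
-- inner 'for o in sides: if o != s: out[s] = o; break'
def pvInnerA (out : PySem.Dict String String) (s : String) : List String → PySem.Dict String String
  | [] => out
  | o :: rest => if o ≠ s then out.insert s o else pvInnerA out s rest

def opposing_side_py (market_dict : List (String × Int)) : List (String × String) :=
  -- sides = list(market_dict.keys()): distinct keys, first-occurrence order
  let sides := PySem.List.dedup (market_dict.map (·.1))
  if sides.length < 2 then []
  else (sides.foldl (fun out s => pvInnerA out s sides) PySem.Dict.empty).items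

-- ===== PORT B =====
def opposing_side_py_alt (market_dict : List (String × Int)) : List (String × String) :=
  let sides := PySem.List.dedup (market_dict.map (·.1))
  if sides.length < 2 then []
  else
    let first := sides.getD 0 ""
    let second := sides.getD 1 ""
    (sides.foldl (fun out s =>
        out.insert s (if s = first then second else first)) PySem.Dict.empty).items

-- ===== PRECONDITION & SPEC =====
def Spec_opposing_side_py (market_dict : List (String × Int)) (out : List (String × String)) : Prop := out = opposing_side_py_alt market_dict
instance (market_dict : List (String × Int)) (out : List (String × String)) : Decidable (Spec_opposing_side_py market_dict out) := by unfold Spec_opposing_side_py; infer_instance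

-- ===== CLAIM (what is proved, stated in full; the proofs are below) =====
def Claim_equal_opposing_side_py : Prop := ∀ (market_dict : List (String × Int)), Dom_opposing_side_py market_dict → Spec_opposing_side_py market_dict (opposing_side_py market_dict)

-- ===== LEMMAS AND PROOFS =====

-- On a sides list s0 :: s1 :: rest with s0 ≠ s1, A's inner find-first scan
-- equals B's closed-form conditional insert, for EVERY s.
theorem pvInnerA_closed (out : PySem.Dict String String) (s s0 s1 : String)
    (rest : List String) (h01 : s0 ≠ s1) :
    pvInnerA out s (s0 :: s1 :: rest)
      = out.insert s (if s = s0 then s1 else s0) := by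
  by_cases hs : s = s0
  · subst hs
    simp [pvInnerA, h01.symm]
  · simp [pvInnerA, Ne.symm hs, hs]

-- ===== VERDICT (by name: the statement is the Claim_ definition above) =====
theorem opposing_side_py_spec : Claim_equal_opposing_side_py := by
  intro md _
  unfold Spec_opposing_side_py opposing_side_py opposing_side_py_alt
  have hnd := PySem.List.nodup_dedup (md.map (·.1))
  rcases hsides : PySem.List.dedup (md.map (·.1)) with _ | ⟨s0, _ | ⟨s1, rest⟩⟩ <;>
    rw [hsides] at hnd ⊢
  · simp
  · simp
  · have h01 : s0 ≠ s1 := by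
      intro e; exact (List.nodup_cons.mp hnd).1 (e ▸ List.mem_cons_self ..)
    have hlen : ¬ (s0 :: s1 :: rest).length < 2 := by simp
    rw [if_neg hlen, if_neg hlen]
    have hf : (fun (out : PySem.Dict String String) s => pvInnerA out s (s0 :: s1 :: rest))
        = (fun (out : PySem.Dict String String) s =>
            out.insert s (if s = (s0 :: s1 :: rest).getD 0 "" then (s0 :: s1 :: rest).getD 1 "" else (s0 :: s1 :: rest).getD 0 "")) := by
      funext out s
      simp [pvInnerA_closed out s s0 s1 rest h01, List.getD]
    rw [hf]
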